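-- pv_equiv track=rewrite | github.com/rmoser/Python_Learning | AdventOfCode/2021/aoc21_22.py | apply
-- ===== SOURCE A (Python) =====
-- import itertools
--
-- def apply(inst, arr):
--     on, ((x0, xn), (y0, yn), (z0, zn)) = inst
--
--     if any((-50 > c or 50 < c) for c in (x0, xn, y0, yn, z0, zn)):
--         return arr, 0
--
--     coords = set(itertools.product(range(x0, xn+1), range(y0, yn+1), range(z0, zn+1)))
--
--     if on:
--         new_arr = arr | coords
--         return new_arr, len(new_arr - arr)
--     else:
--         new_arr = arr - coords
--         return new_arr, -len(arr - new_arr)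
-- ===== SOURCE B (Python) =====
-- import itertools
--
-- def apply(inst, arr):
--     # Bounds-test decomposition: cuboid membership is an inequality check, the
--     # count is closed-form volume minus overlap; the off branch never enumerates
--     # the cuboid at all.
--     on, ((x0, xn), (y0, yn), (z0, zn)) = inst
--
--     if any(-50 > c or 50 < c for c in (x0, xn, y0, yn, z0, zn)):
--         return arr, 0
--
--     def inside(p):
--         x, y, z = p
--         return x0 <= x <= xn and y0 <= y <= yn and z0 <= z <= zn
--
--     overlap = sum(1 for p in arr if inside(p))
--
--     if on:
--         new_arr = set(arr)
--         new_arr |= set(itertools.product(range(x0, xn + 1), range(y0, yn + 1), range(z0, zn + 1)))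
--         vol = max(xn - x0 + 1, 0) * max(yn - y0 + 1, 0) * max(zn - z0 + 1, 0)
--         return new_arr, vol - overlap
--     else:
--         return {p for p in arr if not inside(p)}, -overlap
-- ===== Notes on version B (the rewrite author's own statement) =====
-- stated objective: alternative
-- what changed: A materializes the cuboid's coordinate set and derives result and count from set union/difference algebra; B tests cuboid membership by an inequality bounds check on each existing point, gets the count in closed form (volume minus overlap for on, minus overlap for off) and for off never enumerates the cuboid at all.
import Mathlib
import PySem

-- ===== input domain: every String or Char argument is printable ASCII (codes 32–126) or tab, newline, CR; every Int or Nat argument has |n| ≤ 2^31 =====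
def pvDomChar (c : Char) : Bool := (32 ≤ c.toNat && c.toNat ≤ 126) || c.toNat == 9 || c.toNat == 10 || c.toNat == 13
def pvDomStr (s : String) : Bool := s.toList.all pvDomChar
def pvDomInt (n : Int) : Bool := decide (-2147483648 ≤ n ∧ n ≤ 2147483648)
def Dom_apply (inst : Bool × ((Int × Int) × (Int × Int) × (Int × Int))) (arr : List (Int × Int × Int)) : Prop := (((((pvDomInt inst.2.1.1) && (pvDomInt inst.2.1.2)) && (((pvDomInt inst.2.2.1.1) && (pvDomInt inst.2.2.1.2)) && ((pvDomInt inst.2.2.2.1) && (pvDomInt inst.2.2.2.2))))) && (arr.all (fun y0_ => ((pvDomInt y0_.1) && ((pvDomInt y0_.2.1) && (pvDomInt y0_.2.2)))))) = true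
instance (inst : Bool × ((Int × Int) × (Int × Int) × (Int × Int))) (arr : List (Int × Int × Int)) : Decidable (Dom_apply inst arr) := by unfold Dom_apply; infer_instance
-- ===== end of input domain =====

-- B replaces A's materialized coordinate set and set-difference counting by an inequality
-- bounds check per existing point with a closed-form count (volume minus overlap); the off
-- branch never enumerates the cuboid. Equivalence is about the return value (no argument
-- is mutated by either Python).


-- itertools.product(range(x0,xn+1), range(y0,yn+1), range(z0,zn+1)) as a list of triples
-- in product order (A feeds it to set(...); B's on branch feeds it to set.update).
def pyProduct3 (x0 xn y0 yn z0 zn : Int) : List (Int × Int × Int) :=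
  (PySem.List.pyRange x0 (xn+1) 1).flatMap (fun x =>
    (PySem.List.pyRange y0 (yn+1) 1).flatMap (fun y =>
      (PySem.List.pyRange z0 (zn+1) 1).map (fun z => (x, y, z))))

-- ===== PORT A =====
def apply (inst : Bool × ((Int × Int) × (Int × Int) × (Int × Int))) (arr : List (Int × Int × Int)) : (List (Int × Int × Int)) × Int :=
  match inst with
  | (on, ((x0, xn), (y0, yn), (z0, zn))) =>
    if [x0, xn, y0, yn, z0, zn].any (fun c => decide (-50 > c) || decide (50 < c)) then
      (arr, 0)
    else
      let coords : PySem.Set (Int × Int × Int) := PySem.Set.ofList (pyProduct3 x0 xn y0 yn z0 zn)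
      if on then
        let newArr := PySem.Set.union arr coords
        (newArr, ((PySem.Set.diff newArr arr).length : Int))
      else
        let newArr := PySem.Set.diff arr coords
        (newArr, -((PySem.Set.diff arr newArr).length : Int))

-- ===== PORT B =====
-- Source B's local predicate inside(p): the chained bounds comparison.
def insideB (x0 xn y0 yn z0 zn : Int) (p : Int × Int × Int) : Bool :=
  decide (x0 ≤ p.1) && decide (p.1 ≤ xn) && decide (y0 ≤ p.2.1) && decide (p.2.1 ≤ yn) &&
    decide (z0 ≤ p.2.2) && decide (p.2.2 ≤ zn)

def apply_alt (inst : Bool × ((Int × Int) × (Int × Int) × (Int × Int))) (arr : List (Int × Int × Int)) : (List (Int × Int × Int)) × Int :=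
  match inst with
  | (on, ((x0, xn), (y0, yn), (z0, zn))) =>
    if [x0, xn, y0, yn, z0, zn].any (fun c => decide (-50 > c) || decide (50 < c)) then
      (arr, 0)
    else
      -- overlap = sum(1 for p in arr if inside(p))
      let overlap : Int := ((arr.filter (insideB x0 xn y0 yn z0 zn)).length : Int)
      if on then
        -- new_arr = set(arr); new_arr |= set(itertools.product(...))
        let newArr := PySem.Set.union (PySem.Set.ofList arr) (PySem.Set.ofList (pyProduct3 x0 xn y0 yn z0 zn))
        let vol : Int := max (xn - x0 + 1) 0 * max (yn - y0 + 1) 0 * max (zn - z0 + 1) 0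
        (newArr, vol - overlap)
      else
        -- {p for p in arr if not inside(p)}
        (PySem.Set.ofList (arr.filter (fun p => !insideB x0 xn y0 yn z0 zn p)), -overlap)

-- ===== PRECONDITION & SPEC =====
-- arr models a Python set, so its element list holds distinct elements (on a plain list
-- with repeats there is no set to model, and A raises TypeError at 'arr | coords' /
-- 'arr - coords' on any list); Pre_ states exactly that.
def Pre_apply (inst : Bool × ((Int × Int) × (Int × Int) × (Int × Int))) (arr : List (Int × Int × Int)) : Prop :=
  arr.Nodup
instance (inst : Bool × ((Int × Int) × (Int × Int) × (Int × Int))) (arr : List (Int × Int × Int)) : Decidable (Pre_apply inst arr) := by unfold Pre_apply; infer_instance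
def pvWitness_apply : (Bool × ((Int × Int) × (Int × Int) × (Int × Int))) × (List (Int × Int × Int)) :=
  ((true, ((0, 1), (0, 0), (0, 0))), [(5, 5, 5), (0, 0, 0)])
def Spec_apply (inst : Bool × ((Int × Int) × (Int × Int) × (Int × Int))) (arr : List (Int × Int × Int)) (out : (List (Int × Int × Int)) × Int) : Prop := out = apply_alt inst arr
instance (inst : Bool × ((Int × Int) × (Int × Int) × (Int × Int))) (arr : List (Int × Int × Int)) (out : (List (Int × Int × Int)) × Int) : Decidable (Spec_apply inst arr out) := by unfold Spec_apply; infer_instance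

-- ===== CLAIM (what is proved, stated in full; the proofs are below) =====
def Claim_equal_apply : Prop := ∀ (inst : Bool × ((Int × Int) × (Int × Int) × (Int × Int))) (arr : List (Int × Int × Int)), Dom_apply inst arr → Pre_apply inst arr → Spec_apply inst arr (apply inst arr)

-- ===== LEMMAS AND PROOFS =====


-- membership in the product list IS Source B's bounds check
theorem mem_pyProd (x0 xn y0 yn z0 zn : Int) (p : Int × Int × Int) :
    p ∈ pyProduct3 x0 xn y0 yn z0 zn ↔ insideB x0 xn y0 yn z0 zn p = true := by
  obtain ⟨x, y, z⟩ := p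
  simp [pyProduct3, insideB, PySem.List.mem_pyRange_one]
  omega

-- every point of the inner (fixed-x) block has first component x
theorem fst_of_mem_inner (x y0 yn z0 zn : Int) (p : Int × Int × Int)
    (h : p ∈ (PySem.List.pyRange y0 (yn+1) 1).flatMap (fun y =>
      (PySem.List.pyRange z0 (zn+1) 1).map (fun z => (x, y, z)))) : p.1 = x := by
  simp only [List.mem_flatMap, List.mem_map] at h
  obtain ⟨y, _, z, _, rfl⟩ := h
  rfl

theorem nodup_pyProd (x0 xn y0 yn z0 zn : Int) :
    (pyProduct3 x0 xn y0 yn z0 zn).Nodup := by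
  unfold pyProduct3
  rw [List.nodup_flatMap]
  constructor
  · intro x _
    rw [List.nodup_flatMap]
    constructor
    · intro y _
      exact (PySem.List.nodup_pyRange_one _ _).map
        (fun z1 z2 h => by simpa using congrArg (fun q => q.2.2) h)
    · refine List.Pairwise.imp ?_ (PySem.List.nodup_pyRange_one y0 (yn+1))
      intro y1 y2 hne p hp1 hp2
      simp only [List.mem_map] at hp1 hp2
      obtain ⟨z1, _, rfl⟩ := hp1
      obtain ⟨z2, _, h2⟩ := hp2
      exact hne (congrArg (fun q => q.2.1) h2).symm
  · refine List.Pairwise.imp ?_ (PySem.List.nodup_pyRange_one x0 (xn+1))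
    intro x1 x2 hne p hp1 hp2
    exact hne ((fst_of_mem_inner x1 y0 yn z0 zn p hp1).symm.trans
      (fst_of_mem_inner x2 y0 yn z0 zn p hp2))

theorem sum_map_const_nat {α : Type} (l : List α) (c : Nat) :
    (l.map (fun _ => c)).sum = l.length * c := by
  induction l with
  | nil => simp
  | cons a l ih => simp [Nat.succ_mul, Nat.add_comm]

theorem len_pyProd (x0 xn y0 yn z0 zn : Int) :
    ((pyProduct3 x0 xn y0 yn z0 zn).length : Int)
      = max (xn - x0 + 1) 0 * max (yn - y0 + 1) 0 * max (zn - z0 + 1) 0 := by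
  have hinner : ∀ x : Int, ((PySem.List.pyRange y0 (yn+1) 1).flatMap (fun y =>
      (PySem.List.pyRange z0 (zn+1) 1).map (fun z => (x, y, z)))).length
        = (yn + 1 - y0).toNat * (zn + 1 - z0).toNat := by
    intro x
    rw [List.length_flatMap]
    simp only [List.length_map, PySem.List.length_pyRange_one]
    rw [sum_map_const_nat, PySem.List.length_pyRange_one]
  have h : (pyProduct3 x0 xn y0 yn z0 zn).length
      = (xn + 1 - x0).toNat * ((yn + 1 - y0).toNat * (zn + 1 - z0).toNat) := by
    unfold pyProduct3
    rw [List.length_flatMap]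
    have hcg : ∀ x ∈ PySem.List.pyRange x0 (xn+1) 1,
        ((PySem.List.pyRange y0 (yn+1) 1).flatMap (fun y =>
          (PySem.List.pyRange z0 (zn+1) 1).map (fun z => (x, y, z)))).length
        = (yn + 1 - y0).toNat * (zn + 1 - z0).toNat := fun x _ => hinner x
    rw [List.map_congr_left hcg, sum_map_const_nat, PySem.List.length_pyRange_one]
  rw [h]
  push_cast [Int.ofNat_toNat]
  rw [show xn + 1 - x0 = xn - x0 + 1 by ring, show yn + 1 - y0 = yn - y0 + 1 by ring,
    show zn + 1 - z0 = zn - z0 + 1 by ring]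
  ring

-- both nodup: the intersection counted from either side has the same size
theorem filter_contains_comm {α : Type} [BEq α] [LawfulBEq α] (s t : List α)
    (hs : s.Nodup) (ht : t.Nodup) :
    (s.filter (fun x => PySem.Set.contains t x)).length
      = (t.filter (fun x => PySem.Set.contains s x)).length := by
  have hperm : List.Perm (s.filter (fun x => PySem.Set.contains t x))
      (t.filter (fun x => PySem.Set.contains s x)) := by
    rw [List.perm_ext_iff_of_nodup (hs.filter _) (ht.filter _)]
    intro a
    simp [List.mem_filter, PySem.Set.contains, List.contains_eq_mem, and_comm]
  exact hperm.length_eq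

-- A-side: union with set(L) is update by L.
theorem unionA {α : Type} [BEq α] [LawfulBEq α] (s : PySem.Set α) (L : List α) :
    PySem.Set.union s (PySem.Set.ofList L) = PySem.Set.update s L := by
  show PySem.Set.update s (PySem.Set.ofList L) = PySem.Set.update s L
  rw [PySem.Set.update_eq_append_filter, PySem.Set.update_eq_append_filter,
    PySem.Set.ofList_ofList]

-- A-side: the on-count is the length growth of the update.
theorem diffA_len {α : Type} [BEq α] [LawfulBEq α] (s : PySem.Set α) (L : List α) :
    ((PySem.Set.diff (PySem.Set.update s L) s).length : Int)
      = ((PySem.Set.update s L).length : Int) - (s.length : Int) := by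
  rw [PySem.Set.update_eq_append_filter]
  set t := (PySem.Set.ofList L).filter (fun y => !s.contains y) with ht
  have h0 : List.filter (fun x => !List.contains s x) s = [] := by
    apply List.filter_eq_nil_iff.mpr
    intro x hx
    simp [List.contains_eq_mem, hx]
  have h2 : List.filter (fun x => !List.contains s x) t = t := by
    rw [ht, List.filter_filter]
    apply List.filter_congr
    intro x _
    cases h : s.contains x <;> simp [PySem.Set.contains] at h <;> simp [h]
  simp only [PySem.Set.diff, PySem.Set.contains, List.filter_append, h0, h2,
    List.nil_append, List.length_append]
  push_cast
  omega

-- A-side: off result is a plain filter by membership in L.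
theorem diffA {α : Type} [BEq α] [LawfulBEq α] (s : PySem.Set α) (L : List α) :
    PySem.Set.diff s (PySem.Set.ofList L) = s.filter (fun x => !decide (x ∈ L)) := by
  simp only [PySem.Set.diff]
  apply List.filter_congr
  intro x _
  simp [PySem.Set.contains, List.contains_eq_mem, PySem.Set.mem_ofList]

-- A-side: the off-count counts the removed elements.
theorem diffA2 {α : Type} [BEq α] [LawfulBEq α] (s : PySem.Set α) (L : List α) :
    PySem.Set.diff s (s.filter (fun x => !decide (x ∈ L))) = s.filter (fun x => decide (x ∈ L)) := by
  simp only [PySem.Set.diff]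
  apply List.filter_congr
  intro x hx
  simp only [PySem.Set.contains, List.contains_eq_mem, List.mem_filter, hx, true_and]
  cases h : decide (x ∈ L) <;> simp

-- ===== VERDICT (by name: the statement is the Claim_ definition above) =====
theorem apply_spec : Claim_equal_apply := by
  intro inst arr _ hpre
  have hnd : arr.Nodup := hpre
  unfold Spec_apply
  obtain ⟨on, ⟨⟨x0, xn⟩, ⟨y0, yn⟩, ⟨z0, zn⟩⟩⟩ := inst
  unfold apply apply_alt
  simp only
  split
  · rfl
  · rw [PySem.Set.ofList_eq_self_of_nodup arr hnd]
    set L := pyProduct3 x0 xn y0 yn z0 zn with hL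
    have hLnd : L.Nodup := nodup_pyProd x0 xn y0 yn z0 zn
    have hmemL : ∀ p ∈ arr, decide (p ∈ L) = insideB x0 xn y0 yn z0 zn p := by
      intro p _
      by_cases h : p ∈ L
      · rw [decide_eq_true h, (mem_pyProd x0 xn y0 yn z0 zn p).mp h]
      · have h2 : ¬ insideB x0 xn y0 yn z0 zn p = true :=
          fun hb => h ((mem_pyProd x0 xn y0 yn z0 zn p).mpr hb)
        rw [decide_eq_false h, ((Bool.not_eq_true _).mp h2)]
    cases on
    · -- off branch
      simp only [Bool.false_eq_true, if_false]
      rw [diffA, diffA2]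
      have h1 : arr.filter (fun x => !decide (x ∈ L)) = arr.filter (fun p => !insideB x0 xn y0 yn z0 zn p) := by
        apply List.filter_congr
        intro x hx
        rw [hmemL x hx]
      have h2 : arr.filter (fun x => decide (x ∈ L)) = arr.filter (insideB x0 xn y0 yn z0 zn) := by
        apply List.filter_congr
        intro x hx
        rw [hmemL x hx]
      rw [h1, h2, PySem.Set.ofList_eq_self_of_nodup _ (hnd.filter _)]
    · -- on branch
      simp only [if_true]
      rw [unionA, diffA_len]
      refine Prod.ext rfl ?_
      simp only
      rw [PySem.Set.update_eq_append_filter, PySem.Set.ofList_eq_self_of_nodup L hLnd]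
      have hcontL : ∀ p : Int × Int × Int, PySem.Set.contains L p = insideB x0 xn y0 yn z0 zn p := by
        intro p
        cases hb : insideB x0 xn y0 yn z0 zn p
        · have hm : p ∉ L := fun hm => by
            have := (mem_pyProd x0 xn y0 yn z0 zn p).mp hm
            rw [this] at hb
            exact Bool.noConfusion hb
          simp [PySem.Set.contains, List.contains_eq_mem, hm]
        · have hmemp : p ∈ L := (mem_pyProd x0 xn y0 yn z0 zn p).mpr hb
          simp [PySem.Set.contains, List.contains_eq_mem, hmemp]
      have hsplit : ((L.filter (fun y => !PySem.Set.contains arr y)).length : Int)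
          + ((L.filter (fun y => PySem.Set.contains arr y)).length : Int) = (L.length : Int) := by
        have h := List.length_eq_length_filter_add (l := L) (fun y => PySem.Set.contains arr y)
        push_cast [h]
        ring
      have hswap : ((L.filter (fun y => PySem.Set.contains arr y)).length : Int)
          = ((arr.filter (insideB x0 xn y0 yn z0 zn)).length : Int) := by
        have h2 : arr.filter (fun x => PySem.Set.contains L x)
            = arr.filter (insideB x0 xn y0 yn z0 zn) :=
          List.filter_congr (fun x _ => hcontL x)
        rw [← h2]
        exact_mod_cast filter_contains_comm L arr hLnd hnd
      have hlen := len_pyProd x0 xn y0 yn z0 zn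
      rw [← hL] at hlen
      simp only [List.length_append]
      push_cast
      omega
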